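-- pv_equiv track=rewrite | github.com/asinisusanya/agentic-booking | src/agentic/renderer.py | _group_interventions
-- ===== SOURCE A (Python) =====
-- from typing import List, Dict, Any
--
-- def _group_interventions(interventions: List[Dict[str, Any]]):
--     arrival_types = {"reassurance", "logistics", "convenience", "timing"}
--     experience_types = {"premium", "upsell", "experience", "local_events", "quality", "highlight"}
--     perks_types = {"offer", "perk", "thankyou", "value", "loyalty"}
--
--     arrival = []
--     experience = []
--     perks = []
--
--     for it in interventions:
--         t = it.get("type", "").lower()
--         txt = it.get("text", "")
--         if t in arrival_types:
--             arrival.append(txt)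
--         elif t in experience_types:
--             experience.append(txt)
--         elif t in perks_types:
--             perks.append(txt)
--         else:
--             experience.append(txt)
--
--     # Deduplicate
--     def uniq(lst):
--         seen = set()
--         out = []
--         for x in lst:
--             if x not in seen:
--                 seen.add(x)
--                 out.append(x)
--         return out
--
--     return {
--         "arrival": uniq(arrival),
--         "experience": uniq(experience),
--         "perks": uniq(perks),
--     }
-- ===== SOURCE B (Python) =====
-- from typing import List, Dict, Any
--
-- def _group_interventions(interventions: List[Dict[str, Any]]):
--     # classification via a precomputed type->bucket lookup table (unknown types default
--     # to "experience"), then per-bucket dedup by repeatedly taking the head and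
--     # filtering out its duplicates (no seen-set).
--     bucket_of = {}
--     for t in ("reassurance", "logistics", "convenience", "timing"):
--         bucket_of[t] = "arrival"
--     for t in ("premium", "upsell", "experience", "local_events", "quality", "highlight"):
--         bucket_of[t] = "experience"
--     for t in ("offer", "perk", "thankyou", "value", "loyalty"):
--         bucket_of[t] = "perks"
--
--     def dedup(lst):
--         out = []
--         while lst:
--             head = lst[0]
--             out.append(head)
--             lst = [x for x in lst[1:] if x != head]
--         return out
--
--     pairs = [(bucket_of.get(it.get("type", "").lower(), "experience"), it.get("text", ""))
--              for it in interventions]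
--     return {k: dedup([txt for b, txt in pairs if b == k])
--             for k in ("arrival", "experience", "perks")}
-- ===== Notes on version B (the rewrite author's own statement) =====
-- stated objective: alternative
-- what changed: Replaced A's if/elif set-membership classification by a precomputed type->bucket lookup table (with 'experience' as the .get default) and A's seen-set dedup loops by a take-head-and-filter-out-duplicates dedup over per-bucket (bucket, text) pair lists.
import Mathlib
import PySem

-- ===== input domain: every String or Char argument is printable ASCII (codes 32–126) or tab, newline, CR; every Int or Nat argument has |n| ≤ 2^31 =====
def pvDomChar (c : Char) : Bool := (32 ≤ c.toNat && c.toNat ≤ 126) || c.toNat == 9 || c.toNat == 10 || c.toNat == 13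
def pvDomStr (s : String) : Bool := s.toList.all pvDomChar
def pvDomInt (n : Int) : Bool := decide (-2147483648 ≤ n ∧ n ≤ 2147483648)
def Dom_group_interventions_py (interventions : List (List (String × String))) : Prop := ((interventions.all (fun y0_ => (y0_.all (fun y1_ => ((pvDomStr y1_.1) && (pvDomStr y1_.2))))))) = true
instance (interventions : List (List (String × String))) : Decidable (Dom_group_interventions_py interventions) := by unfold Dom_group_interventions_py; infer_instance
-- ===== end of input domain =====

-- B replaces A's if/elif classification by a precomputed type->bucket lookup table and A's
-- seen-set dedup by head-take-and-filter dedup ("alternative": different decomposition, same value).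

-- ===== PORT A =====
def pvArrSet : PySem.Set String := PySem.Set.ofList ["reassurance", "logistics", "convenience", "timing"]
def pvExpSet : PySem.Set String := PySem.Set.ofList ["premium", "upsell", "experience", "local_events", "quality", "highlight"]
def pvPerkSet : PySem.Set String := PySem.Set.ofList ["offer", "perk", "thankyou", "value", "loyalty"]

def pvTOf (it : List (String × String)) : String :=
  PySem.Str.lower (PySem.Dict.getD (PySem.Dict.mk it) "type" "")
def pvTxtOf (it : List (String × String)) : String :=
  PySem.Dict.getD (PySem.Dict.mk it) "text" ""

-- A's classification loop body: append txt to the chosen raw bucket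
def pvStepA (st : List String × List String × List String) (it : List (String × String)) :
    List String × List String × List String :=
  let t := pvTOf it
  let txt := pvTxtOf it
  if PySem.Set.contains pvArrSet t then (st.1 ++ [txt], st.2.1, st.2.2)
  else if PySem.Set.contains pvExpSet t then (st.1, st.2.1 ++ [txt], st.2.2)
  else if PySem.Set.contains pvPerkSet t then (st.1, st.2.1, st.2.2 ++ [txt])
  else (st.1, st.2.1 ++ [txt], st.2.2)

-- A's nested uniq helper (seen-set loop)
def pvUniq (lst : List String) : List String :=
  (lst.foldl
    (fun (st : List String × PySem.Set String) x =>
      if PySem.Set.contains st.2 x then st else (st.1 ++ [x], PySem.Set.add st.2 x))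
    ([], PySem.Set.empty)).1

def group_interventions_py (interventions : List (List (String × String))) : List (String × List String) :=
  let r := interventions.foldl pvStepA ([], [], [])
  [("arrival", pvUniq r.1), ("experience", pvUniq r.2.1), ("perks", pvUniq r.2.2)]

-- ===== PORT B =====
-- the type -> bucket lookup table, built by B's three loops
def pvBucketOf : PySem.Dict String String :=
  let d := ["reassurance", "logistics", "convenience", "timing"].foldl
    (fun d t => d.insert t "arrival") PySem.Dict.empty
  let d := ["premium", "upsell", "experience", "local_events", "quality", "highlight"].foldl
    (fun d t => d.insert t "experience") d
  ["offer", "perk", "thankyou", "value", "loyalty"].foldl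
    (fun d t => d.insert t "perks") d

-- B's dedup: take the head, filter its duplicates out of the rest, repeat
def pvDedup : List String → List String
  | [] => []
  | h :: t => h :: pvDedup (t.filter (fun x => x != h))
termination_by l => l.length
decreasing_by simpa using Nat.lt_succ_of_le (t.length_filter_le _)

def group_interventions_py_alt (interventions : List (List (String × String))) : List (String × List String) :=
  let pairs := interventions.map
    (fun it => (PySem.Dict.getD pvBucketOf (pvTOf it) "experience", pvTxtOf it))
  ["arrival", "experience", "perks"].map
    (fun k => (k, pvDedup ((pairs.filter (fun p => p.1 == k)).map (·.2))))

-- ===== PRECONDITION & SPEC =====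
def Spec_group_interventions_py (interventions : List (List (String × String))) (out : List (String × List String)) : Prop := out = group_interventions_py_alt interventions
instance (interventions : List (List (String × String))) (out : List (String × List String)) : Decidable (Spec_group_interventions_py interventions out) := by unfold Spec_group_interventions_py; infer_instance

-- ===== CLAIM (what is proved, stated in full; the proofs are below) =====
def Claim_equal_group_interventions_py : Prop := ∀ (interventions : List (List (String × String))), Dom_group_interventions_py interventions → Spec_group_interventions_py interventions (group_interventions_py interventions)

-- ===== LEMMAS AND PROOFS =====

-- the texts each bucket receives from the classification
def pvT0 (xs : List (List (String × String))) : List String :=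
  xs.filterMap (fun it => if PySem.Set.contains pvArrSet (pvTOf it) then some (pvTxtOf it) else none)
def pvT1 (xs : List (List (String × String))) : List String :=
  xs.filterMap (fun it =>
    if ¬ PySem.Set.contains pvArrSet (pvTOf it) ∧
        (PySem.Set.contains pvExpSet (pvTOf it) ∨ ¬ PySem.Set.contains pvPerkSet (pvTOf it))
    then some (pvTxtOf it) else none)
def pvT2 (xs : List (List (String × String))) : List String :=
  xs.filterMap (fun it =>
    if ¬ PySem.Set.contains pvArrSet (pvTOf it) ∧ ¬ PySem.Set.contains pvExpSet (pvTOf it) ∧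
        PySem.Set.contains pvPerkSet (pvTOf it)
    then some (pvTxtOf it) else none)

theorem pvFoldA (xs : List (List (String × String))) (a e p : List String) :
    xs.foldl pvStepA (a, e, p) = (a ++ pvT0 xs, e ++ pvT1 xs, p ++ pvT2 xs) := by
  induction xs generalizing a e p with
  | nil => simp [pvT0, pvT1, pvT2]
  | cons it xs ih =>
    simp only [List.foldl_cons, pvStepA, pvT0, pvT1, pvT2, List.filterMap_cons]
    by_cases h0 : PySem.Set.contains pvArrSet (pvTOf it)
    · simp only [h0, if_pos, ite_true]
      rw [ih]; simp [pvT0, pvT1, pvT2, h0]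
    · by_cases h1 : PySem.Set.contains pvExpSet (pvTOf it)
      · simp only [h0, h1, ite_true, ite_false]
        rw [ih]; simp [pvT0, pvT1, pvT2, h0, h1]
      · by_cases h2 : PySem.Set.contains pvPerkSet (pvTOf it)
        · simp only [h0, h1, h2, ite_true, ite_false]
          rw [ih]; simp [pvT0, pvT1, pvT2, h0, h1, h2]
        · simp only [h0, h1, h2, ite_false]
          rw [ih]; simp [pvT0, pvT1, pvT2, h0, h1, h2]

-- the lookup table agrees with A's if/elif chain
theorem pvClassifyEq (t : String) :
    PySem.Dict.getD pvBucketOf t "experience" =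
      (if PySem.Set.contains pvArrSet t then "arrival"
       else if PySem.Set.contains pvExpSet t then "experience"
       else if PySem.Set.contains pvPerkSet t then "perks"
       else "experience") := by
  have h : pvBucketOf = PySem.Dict.mk
    [("reassurance","arrival"),("logistics","arrival"),("convenience","arrival"),("timing","arrival"),
     ("premium","experience"),("upsell","experience"),("experience","experience"),("local_events","experience"),
     ("quality","experience"),("highlight","experience"),
     ("offer","perks"),("perk","perks"),("thankyou","perks"),("value","perks"),("loyalty","perks")] := by decide
  rw [h]
  by_cases h0 : t = "reassurance"
  · subst h0; decide
  by_cases h1 : t = "logistics"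
  · subst h1; decide
  by_cases h2 : t = "convenience"
  · subst h2; decide
  by_cases h3 : t = "timing"
  · subst h3; decide
  by_cases h4 : t = "premium"
  · subst h4; decide
  by_cases h5 : t = "upsell"
  · subst h5; decide
  by_cases h6 : t = "experience"
  · subst h6; decide
  by_cases h7 : t = "local_events"
  · subst h7; decide
  by_cases h8 : t = "quality"
  · subst h8; decide
  by_cases h9 : t = "highlight"
  · subst h9; decide
  by_cases h10 : t = "offer"
  · subst h10; decide
  by_cases h11 : t = "perk"
  · subst h11; decide
  by_cases h12 : t = "thankyou"
  · subst h12; decide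
  by_cases h13 : t = "value"
  · subst h13; decide
  by_cases h14 : t = "loyalty"
  · subst h14; decide
  simp [PySem.Dict.getD_eq_get?_getD, PySem.Dict.get?, pvArrSet, pvExpSet, pvPerkSet,
    PySem.Set.ofList, PySem.Set.contains, h0, h1, h2, h3, h4, h5, h6, h7, h8, h9, h10, h11, h12, h13, h14, Ne.symm h0, Ne.symm h1, Ne.symm h2, Ne.symm h3, Ne.symm h4, Ne.symm h5, Ne.symm h6, Ne.symm h7, Ne.symm h8, Ne.symm h9, Ne.symm h10, Ne.symm h11, Ne.symm h12, Ne.symm h13, Ne.symm h14]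

-- A's uniq loop keeps its out-list and seen-set equal: both are Set.update of the start state
theorem pvFold_pair (lst : List String) (s : PySem.Set String) :
    lst.foldl
      (fun (st : List String × PySem.Set String) x =>
        if PySem.Set.contains st.2 x then st else (st.1 ++ [x], PySem.Set.add st.2 x))
      (s, s) = (PySem.Set.update s lst, PySem.Set.update s lst) := by
  induction lst generalizing s with
  | nil => simp [PySem.Set.update]
  | cons h t ih =>
    by_cases hx : h ∈ s
    · simpa [PySem.Set.add, PySem.Set.update, hx] using ih s
    · simpa [PySem.Set.add, PySem.Set.update, hx] using ih (s ++ [h])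

theorem pvContains_append (s : PySem.Set String) (h x : String) :
    PySem.Set.contains (s ++ [h]) x = (PySem.Set.contains s x || x == h) := by
  by_cases hxe : x = h <;> simp [PySem.Set.contains, hxe]

-- Set.update is take-head-and-filter dedup
theorem pvUpdate_eq_dedup (lst : List String) (s : PySem.Set String) :
    PySem.Set.update s lst = s ++ pvDedup (lst.filter (fun x => !PySem.Set.contains s x)) := by
  induction lst generalizing s with
  | nil => simp [PySem.Set.update, pvDedup]
  | cons h t ih =>
    by_cases hx : h ∈ s
    · have h1 : PySem.Set.update s (h :: t) = PySem.Set.update s t := by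
        simp [PySem.Set.update, PySem.Set.add, hx]
      rw [h1, ih]
      simp [hx, PySem.Set.contains]
    · have h1 : PySem.Set.update s (h :: t) = PySem.Set.update (s ++ [h]) t := by
        simp [PySem.Set.update, PySem.Set.add, hx]
      rw [h1, ih]
      have h2 : t.filter (fun x => !PySem.Set.contains (s ++ [h]) x)
          = (t.filter (fun x => !PySem.Set.contains s x)).filter (fun x => x != h) := by
        rw [List.filter_filter]
        apply List.filter_congr
        intro x _
        rw [pvContains_append]
        cases hc : PySem.Set.contains s x <;> by_cases hxe : x = h <;> simp [hc, hxe, bne]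
      rw [h2]
      simp [hx, pvDedup, PySem.Set.contains]

theorem pvUniq_eq_pvDedup (lst : List String) : pvUniq lst = pvDedup lst := by
  unfold pvUniq
  rw [show (PySem.Set.empty : PySem.Set String) = ([] : List String) from rfl, pvFold_pair]
  rw [pvUpdate_eq_dedup]
  simp [PySem.Set.contains]

-- B's per-bucket raw lists are A's
theorem pvBucketArr (xs : List (List (String × String))) :
    ((xs.map (fun it => (PySem.Dict.getD pvBucketOf (pvTOf it) "experience", pvTxtOf it))).filter
        (fun p => p.1 == "arrival")).map (·.2) = pvT0 xs := by
  induction xs with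
  | nil => simp [pvT0]
  | cons it xs ih =>
    simp only [List.map_cons, List.filter_cons, pvT0, List.filterMap_cons]
    rw [pvClassifyEq]
    by_cases h0 : PySem.Set.contains pvArrSet (pvTOf it)
    · simp only [h0, ite_true]
      by_cases hk : (("arrival" : String) == "arrival") = true <;> simp_all [pvT0]
    · by_cases h1 : PySem.Set.contains pvExpSet (pvTOf it)
      · simp only [h0, h1, ite_true, ite_false, Bool.false_eq_true]
        by_cases hk : (("experience" : String) == "arrival") = true <;> simp_all [pvT0]
      · by_cases h2 : PySem.Set.contains pvPerkSet (pvTOf it)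
        · simp only [h0, h1, h2, ite_true, ite_false, Bool.false_eq_true]
          by_cases hk : (("perks" : String) == "arrival") = true <;> simp_all [pvT0]
        · simp only [h0, h1, h2, ite_false, Bool.false_eq_true]
          by_cases hk : (("experience" : String) == "arrival") = true <;> simp_all [pvT0]

theorem pvBucketExp (xs : List (List (String × String))) :
    ((xs.map (fun it => (PySem.Dict.getD pvBucketOf (pvTOf it) "experience", pvTxtOf it))).filter
        (fun p => p.1 == "experience")).map (·.2) = pvT1 xs := by
  induction xs with
  | nil => simp [pvT1]
  | cons it xs ih =>
    simp only [List.map_cons, List.filter_cons, pvT1, List.filterMap_cons]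
    rw [pvClassifyEq]
    by_cases h0 : PySem.Set.contains pvArrSet (pvTOf it)
    · simp only [h0, ite_true]
      by_cases hk : (("arrival" : String) == "experience") = true <;> simp_all [pvT1]
    · by_cases h1 : PySem.Set.contains pvExpSet (pvTOf it)
      · simp only [h0, h1, ite_true, ite_false, Bool.false_eq_true]
        by_cases hk : (("experience" : String) == "experience") = true <;> simp_all [pvT1]
      · by_cases h2 : PySem.Set.contains pvPerkSet (pvTOf it)
        · simp only [h0, h1, h2, ite_true, ite_false, Bool.false_eq_true]
          by_cases hk : (("perks" : String) == "experience") = true <;> simp_all [pvT1]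
        · simp only [h0, h1, h2, ite_false, Bool.false_eq_true]
          by_cases hk : (("experience" : String) == "experience") = true <;> simp_all [pvT1]

theorem pvBucketPerk (xs : List (List (String × String))) :
    ((xs.map (fun it => (PySem.Dict.getD pvBucketOf (pvTOf it) "experience", pvTxtOf it))).filter
        (fun p => p.1 == "perks")).map (·.2) = pvT2 xs := by
  induction xs with
  | nil => simp [pvT2]
  | cons it xs ih =>
    simp only [List.map_cons, List.filter_cons, pvT2, List.filterMap_cons]
    rw [pvClassifyEq]
    by_cases h0 : PySem.Set.contains pvArrSet (pvTOf it)
    · simp only [h0, ite_true]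
      by_cases hk : (("arrival" : String) == "perks") = true <;> simp_all [pvT2]
    · by_cases h1 : PySem.Set.contains pvExpSet (pvTOf it)
      · simp only [h0, h1, ite_true, ite_false, Bool.false_eq_true]
        by_cases hk : (("experience" : String) == "perks") = true <;> simp_all [pvT2]
      · by_cases h2 : PySem.Set.contains pvPerkSet (pvTOf it)
        · simp only [h0, h1, h2, ite_true, ite_false, Bool.false_eq_true]
          by_cases hk : (("perks" : String) == "perks") = true <;> simp_all [pvT2]
        · simp only [h0, h1, h2, ite_false, Bool.false_eq_true]
          by_cases hk : (("experience" : String) == "perks") = true <;> simp_all [pvT2]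

-- ===== VERDICT (by name: the statement is the Claim_ definition above) =====
theorem group_interventions_py_spec : Claim_equal_group_interventions_py := by
  intro xs _
  unfold Spec_group_interventions_py group_interventions_py group_interventions_py_alt
  rw [pvFoldA]
  simp only [List.map_cons, List.map_nil]
  rw [pvBucketArr, pvBucketExp, pvBucketPerk]
  simp [pvUniq_eq_pvDedup]
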